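-- pv_equiv track=rewrite | github.com/xbmc/repo-scripts | weather.noaa/default.py | code_from_icon
-- ===== SOURCE A (Python) =====
-- def code_from_icon(icon):
--   if icon:
--     #xbmc.log('icon: %s' % (icon) ,level=xbmc.LOGDEBUG)
--
--
--     daynight="day"
--
--     #special handling of forecast.weather.gov "dualimage" icon generator urls
--     #https://forecast.weather.gov/DualImage.php?i=bkn&j=shra&jp=30
--     #https://forecast.weather.gov/DualImage.php?i=shra&j=bkn&ip=30
--     if 'DualImage' in icon:
--       params = icon.split("?")[1].split("&")
--       code="day"
--       rain=None
--       for param in params: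
--         thing=param.split("=")
--         p=thing[0]
--         v=thing[1]
--         if p == "i":
--           code="%s/%s" % ("day",v)
--         if p == "ip" or p == "jp":
--           if rain is None or v > rain:
--             rain=v
--
--       return code, rain
--
--
--     if '?' in icon:
--       icon=icon.rsplit('?', 1)[0]
--
--     # strip off file extension if we have one
--     icon=icon.replace(".png","")
--     icon=icon.replace(".jpg","")
--
--     if "/day/" in icon:
--       daynight="day"
--     elif "/night/" in icon:
--       daynight="night"
--
--     rain = None
--     code = None
--     # loop though our "split" icon paths, and get max rain percent
--     # take last icon code in the process
--     for checkcode in icon.rsplit('/'):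
--       thing=checkcode.split(",")
--       code="%s/%s" % (daynight,thing[0])
--       if len(thing) > 1:
--         train=thing[1]
--         if rain is None or train > rain:
--           rain=train
--
--     return code, rain
-- ===== SOURCE B (Python) =====
-- def code_from_icon(icon):
--   # Same guards/preprocessing; then answers are read off built data structures:
--   # a last-wins dict for the DualImage code and a sorted list (last element = max)
--   # for the rain percent, instead of a loop threading two accumulators.
--   if not icon:
--     return None
--
--   if 'DualImage' in icon:
--     pairs = [p.split('=') for p in icon.split('?')[1].split('&')]
--     last = {kv[0]: kv[1] for kv in pairs}
--     code = 'day/' + last['i'] if 'i' in last else 'day'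
--     rains = sorted(kv[1] for kv in pairs if kv[0] in ('ip', 'jp'))
--     return code, (rains[-1] if rains else None)
--
--   if '?' in icon:
--     icon = icon.rsplit('?', 1)[0]
--   icon = icon.replace('.png', '').replace('.jpg', '')
--   daynight = 'night' if '/night/' in icon and '/day/' not in icon else 'day'
--
--   segs = icon.split('/')
--   code = daynight + '/' + segs[-1].split(',')[0]
--   rains = sorted(f[1] for f in (s.split(',') for s in segs) if len(f) > 1)
--   return code, (rains[-1] if rains else None)
-- ===== Notes on version B (the rewrite author's own statement) =====
-- stated objective: alternative
-- what changed: Replaces A's single loop threading a last-code and a running-max accumulator by built data structures read off afterwards: a last-wins dict of the query parameters gives the DualImage code, and the rain percent is the last element of a sorted list of the comma/percent fields (equal to the running string max since tied maxima are equal strings).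
import Mathlib
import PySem

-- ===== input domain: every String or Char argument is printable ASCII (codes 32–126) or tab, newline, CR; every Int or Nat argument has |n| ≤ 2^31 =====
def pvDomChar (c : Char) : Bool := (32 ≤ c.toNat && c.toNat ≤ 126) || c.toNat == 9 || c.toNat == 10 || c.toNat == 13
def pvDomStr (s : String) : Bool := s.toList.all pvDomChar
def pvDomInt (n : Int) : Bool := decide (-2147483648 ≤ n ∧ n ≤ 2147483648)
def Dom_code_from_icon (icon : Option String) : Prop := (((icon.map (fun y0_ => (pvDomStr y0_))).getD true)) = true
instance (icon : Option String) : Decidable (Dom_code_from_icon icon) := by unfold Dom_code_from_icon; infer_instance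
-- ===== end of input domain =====

-- B keeps A's guards/preprocessing but reads the answers off built data structures (a
-- last-wins dict for the DualImage code, a sorted list whose last element is the max rain)
-- instead of threading two accumulators through one loop; return-value equivalence.

-- s.split(sep) for a non-empty literal sep (split? is some exactly when sep ≠ "")
def pySplit (s sep : String) : List String := (PySem.Str.split? s sep).getD []

-- ===== PORT A =====
-- the DualImage for-loop of A: threads code and rain through the params
def aDualLoop (params : List String) (code : String) (rain : Option String) : String × Option String :=
  match params with
  | [] => (code, rain)
  | param :: rest =>
    let thing := pySplit param "="
    let p := (PySem.List.pyGet? thing 0).getD ""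
    let v := (PySem.List.pyGet? thing 1).getD ""   -- thing[1]; the IndexError inputs are outside Pre_
    let code1 := if p = "i" then "day/" ++ v else code
    let rain1 := if p = "ip" ∨ p = "jp" then
        match rain with
        | none => some v
        | some r => if r < v then some v else some r   -- 'if rain is None or v > rain'
      else rain
    aDualLoop rest code1 rain1

-- the main for-loop of A over icon.rsplit('/')
def aMainLoop (segs : List String) (daynight : String) (code rain : Option String) :
    Option String × Option String :=
  match segs with
  | [] => (code, rain)
  | checkcode :: rest =>
    let thing := pySplit checkcode ","
    let code1 := some (daynight ++ "/" ++ (PySem.List.pyGet? thing 0).getD "")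
    let rain1 := if thing.length > 1 then
        let train := (PySem.List.pyGet? thing 1).getD ""
        match rain with
        | none => some train
        | some r => if r < train then some train else some r
      else rain
    aMainLoop rest daynight code1 rain1

def code_from_icon (icon : Option String) : Option (Option String × Option String) :=
  match icon with
  | none => none
  | some icon0 =>
    if icon0 = "" then none    -- 'if icon:' — falsy ⇒ implicit None
    else if PySem.Str.isIn "DualImage" icon0 then
      let params := pySplit ((PySem.List.pyGet? (pySplit icon0 "?") 1).getD "") "&"
      let cr := aDualLoop params "day" none
      some (some cr.1, cr.2)
    else
      -- icon.rsplit('?', 1)[0] = '?'.join(icon.split('?')[:-1]) — exact, since '?' ∈ icon here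
      let icon1 := if PySem.Str.isIn "?" icon0 then
          PySem.Str.join "?" (pySplit icon0 "?").dropLast
        else icon0
      let icon2 := PySem.Str.replace (PySem.Str.replace icon1 ".png" "") ".jpg" ""
      let daynight := if PySem.Str.isIn "/day/" icon2 then "day"
        else if PySem.Str.isIn "/night/" icon2 then "night"
        else "day"
      -- icon.rsplit('/') with no maxsplit equals icon.split('/') — exact
      let cr := aMainLoop (pySplit icon2 "/") daynight none none
      some (cr.1, cr.2)

-- ===== PORT B =====
def code_from_icon_alt (icon : Option String) : Option (Option String × Option String) :=
  match icon with
  | none => none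
  | some icon0 =>
    if icon0 = "" then none
    else if PySem.Str.isIn "DualImage" icon0 then
      let pairs := (pySplit ((PySem.List.pyGet? (pySplit icon0 "?") 1).getD "") "&").map
        (fun p => pySplit p "=")
      -- last = {kv[0]: kv[1] for kv in pairs} — a dict, so the LAST value per key wins
      let last := pairs.foldl
        (fun d kv => d.insert ((PySem.List.pyGet? kv 0).getD "") ((PySem.List.pyGet? kv 1).getD ""))
        PySem.Dict.empty
      let code := match last.get? "i" with       -- 'day/'+last['i'] if 'i' in last else 'day'
        | some v => "day/" ++ v
        | none => "day"
      let rains := PySem.List.sorted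
        ((pairs.filter (fun kv =>
            decide ((PySem.List.pyGet? kv 0).getD "" = "ip" ∨ (PySem.List.pyGet? kv 0).getD "" = "jp"))).map
          (fun kv => (PySem.List.pyGet? kv 1).getD "")) (fun x => x) false
      some (some code, PySem.List.pyGet? rains (-1))   -- rains[-1] if rains else None
    else
      let icon1 := if PySem.Str.isIn "?" icon0 then
          PySem.Str.join "?" (pySplit icon0 "?").dropLast   -- icon.rsplit('?', 1)[0], as in A — exact
        else icon0
      let icon2 := PySem.Str.replace (PySem.Str.replace icon1 ".png" "") ".jpg" ""
      let daynight := if PySem.Str.isIn "/night/" icon2 && !(PySem.Str.isIn "/day/" icon2)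
        then "night" else "day"
      let segs := pySplit icon2 "/"
      let code := daynight ++ "/" ++
        (PySem.List.pyGet? (pySplit ((PySem.List.pyGet? segs (-1)).getD "") ",") 0).getD ""
      let rains := PySem.List.sorted
        (((segs.map (fun s => pySplit s ",")).filter (fun f => decide (f.length > 1))).map
          (fun f => (PySem.List.pyGet? f 1).getD "")) (fun x => x) false
      some (some code, PySem.List.pyGet? rains (-1))

-- ===== PRECONDITION & SPEC =====
-- Pre_ excludes exactly the inputs where the Python A raises IndexError: a DualImage icon
-- with no question mark, or one whose query part has a parameter missing its equals sign.
def Pre_code_from_icon (icon : Option String) : Prop :=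
  (match icon with
   | none => true
   | some s => !PySem.Str.isIn "DualImage" s ||
       (PySem.Str.isIn "?" s &&
        (pySplit ((PySem.List.pyGet? (pySplit s "?") 1).getD "") "&").all
          (fun p => PySem.Str.isIn "=" p))) = true
instance (icon : Option String) : Decidable (Pre_code_from_icon icon) := by
  unfold Pre_code_from_icon; infer_instance

def pvWitness_code_from_icon : Option String := some "https://x/day/sct,30.png"

def Spec_code_from_icon (icon : Option String) (out : Option (Option String × Option String)) : Prop := out = code_from_icon_alt icon
instance (icon : Option String) (out : Option (Option String × Option String)) : Decidable (Spec_code_from_icon icon out) := by unfold Spec_code_from_icon; infer_instance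

-- ===== CLAIM (what is proved, stated in full; the proofs are below) =====
def Claim_equal_code_from_icon : Prop := ∀ (icon : Option String), Dom_code_from_icon icon → Pre_code_from_icon icon → Spec_code_from_icon icon (code_from_icon icon)

-- ===== LEMMAS AND PROOFS =====

-- the running-max step of A's two loops
def mstep (acc : Option String) (x : String) : Option String :=
  match acc with
  | none => some x
  | some m => if m < x then some x else some m

theorem mstep_some (m x : String) : mstep (some m) x = some (max m x) := by
  simp only [mstep]
  rcases lt_or_ge m x with h | h
  · rw [if_pos h, max_eq_right (le_of_lt h)]
  · rw [if_neg (not_lt.mpr h), max_eq_left h]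

theorem mfold_some (t : List String) : ∀ m, t.foldl mstep (some m) = some (t.foldl max m) := by
  induction t with
  | nil => intro m; rfl
  | cons x r ih => intro m; rw [List.foldl_cons, mstep_some, ih, List.foldl_cons]

theorem mfold_eq_max? (l : List String) : l.foldl mstep none = l.max? := by
  cases l with
  | nil => rfl
  | cons x t =>
    rw [List.foldl_cons]
    show t.foldl mstep (some x) = (x :: t).max?
    rw [mfold_some]; rfl

theorem le_getLast?_of_pairwise : ∀ (ys : List String), ys.Pairwise (fun a b => a ≤ b) →
    ∀ y ∈ ys, ∀ m, ys.getLast? = some m → y ≤ m := by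
  intro ys
  induction ys with
  | nil => intro _ y hy; cases hy
  | cons a t ih =>
    intro hpw y hy m hm
    rcases List.pairwise_cons.mp hpw with ⟨ha, ht⟩
    cases t with
    | nil =>
      simp only [List.getLast?_singleton, Option.some.injEq] at hm
      rcases List.mem_singleton.mp hy with rfl
      exact le_of_eq hm
    | cons b r =>
      have hm' : (b :: r).getLast? = some m := by
        rwa [List.getLast?_cons_cons] at hm
      rcases List.mem_cons.mp hy with rfl | hy'
      · have hmem : m ∈ b :: r := List.mem_of_getLast? hm'
        exact ha m hmem
      · exact ih ht y hy' m hm'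

theorem sorted_getLast?_eq_max? (l : List String) :
    (PySem.List.sorted l (fun x => x) false).getLast? = l.max? := by
  cases hl : l.max? with
  | none =>
    have : l = [] := List.max?_eq_none_iff.mp hl
    subst this; rfl
  | some M =>
    have hMl : M ∈ l := List.max?_mem hl
    have hle : ∀ b ∈ l, b ≤ M := (List.max?_le_iff hl).mp (le_refl M)
    have hperm : (PySem.List.sorted l (fun x => x) false).Perm l :=
      PySem.List.sorted_perm l (fun x => x) false
    have hpw : (PySem.List.sorted l (fun x => x) false).Pairwise (fun a b => a ≤ b) := by
      have := PySem.List.sorted_pairwise l (fun x => x)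
      simpa using this
    cases hlast : (PySem.List.sorted l (fun x => x) false).getLast? with
    | none =>
      have hnil : PySem.List.sorted l (fun x => x) false = [] :=
        List.getLast?_eq_none_iff.mp hlast
      have : l = [] := (hnil ▸ hperm).symm.eq_nil
      simp [this] at hl
    | some m =>
      have hmem : m ∈ l := hperm.mem_iff.mp (List.mem_of_getLast? hlast)
      have h1 : m ≤ M := hle m hmem
      have h2 : M ≤ m :=
        le_getLast?_of_pairwise _ hpw M (hperm.mem_iff.mpr hMl) m hlast
      rw [le_antisymm h1 h2]

-- a dict built by inserting key/value pairs in order: lookup = LAST matching value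
theorem get?_foldl_insert (kvs : List (List String)) (k : String) : ∀ (d : PySem.Dict String String),
    (kvs.foldl (fun d kv =>
        d.insert ((PySem.List.pyGet? kv 0).getD "") ((PySem.List.pyGet? kv 1).getD "")) d).get? k
    = match ((kvs.filter (fun kv => decide ((PySem.List.pyGet? kv 0).getD "" = k))).map
          (fun kv => (PySem.List.pyGet? kv 1).getD "")).getLast? with
      | some v => some v
      | none => d.get? k := by
  induction kvs with
  | nil => intro d; rfl
  | cons kv rest ih =>
    intro d
    rw [List.foldl_cons, ih, List.filter_cons]
    by_cases hk : (PySem.List.pyGet? kv 0).getD "" = k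
    · rw [if_pos (by simp [hk]), List.map_cons, List.getLast?_cons]
      cases hrest : ((rest.filter (fun kv => decide ((PySem.List.pyGet? kv 0).getD "" = k))).map
          (fun kv => (PySem.List.pyGet? kv 1).getD "")).getLast? with
      | none => simp [hk]
      | some v => simp
    · rw [if_neg (by simp [hk])]
      cases hrest : ((rest.filter (fun kv => decide ((PySem.List.pyGet? kv 0).getD "" = k))).map
          (fun kv => (PySem.List.pyGet? kv 1).getD "")).getLast? with
      | none =>
        have hk' : ¬ k = (PySem.List.pyGet? kv 0).getD "" := fun h => hk h.symm
        simp [PySem.Dict.get?_insert, hk']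
      | some v => simp

theorem dualLoop_eq (params : List String) : ∀ (code : String) (rain : Option String),
    aDualLoop params code rain =
      ( (((params.map (fun p => pySplit p "=")).filter
            (fun kv => decide ((PySem.List.pyGet? kv 0).getD "" = "i"))).map
            (fun kv => "day/" ++ (PySem.List.pyGet? kv 1).getD "")).getLastD code,
        (((params.map (fun p => pySplit p "=")).filter
            (fun kv => decide ((PySem.List.pyGet? kv 0).getD "" = "ip" ∨
                               (PySem.List.pyGet? kv 0).getD "" = "jp"))).map
            (fun kv => (PySem.List.pyGet? kv 1).getD "")).foldl mstep rain ) := by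
  induction params with
  | nil => intro code rain; rfl
  | cons param rest ih =>
    intro code rain
    simp only [aDualLoop, List.map_cons, List.filter_cons]
    by_cases hi : (PySem.List.pyGet? (pySplit param "=") 0).getD "" = "i" <;>
      by_cases hr : (PySem.List.pyGet? (pySplit param "=") 0).getD "" = "ip" ∨
                    (PySem.List.pyGet? (pySplit param "=") 0).getD "" = "jp" <;>
      simp only [hi, hr, if_pos, decide_eq_true_eq, ih, List.map_cons,
        List.getLastD_cons, List.foldl_cons, decide_true, decide_false] <;>
      simp [mstep]

theorem mainLoop_eq (daynight : String) (segs : List String) :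
    ∀ (code rain : Option String),
    aMainLoop segs daynight code rain =
      ( (segs.map (fun s => some (daynight ++ "/" ++ (PySem.List.pyGet? (pySplit s ",") 0).getD ""))).getLastD code,
        (((segs.map (fun s => pySplit s ",")).filter (fun f => decide (f.length > 1))).map
            (fun f => (PySem.List.pyGet? f 1).getD "")).foldl mstep rain ) := by
  induction segs with
  | nil => intro code rain; rfl
  | cons s rest ih =>
    intro code rain
    simp only [aMainLoop, List.map_cons, List.filter_cons, List.getLastD_cons]
    by_cases hl : (pySplit s ",").length > 1 <;>
      simp only [hl, decide_true, decide_false, ite_true, ite_false, ih, List.map_cons,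
        List.foldl_cons] <;>
      simp [mstep, hl]

theorem splitOn_go_ne_nil (sep : List Char) :
    ∀ (fuel : Nat) (l cur : List Char) (acc : List (List Char)),
      PySem.Chars.splitOn.go sep fuel l cur acc ≠ [] := by
  intro fuel
  induction fuel with
  | zero => intro l cur acc; simp [PySem.Chars.splitOn.go]
  | succ n ih =>
    intro l cur acc
    cases l with
    | nil => simp [PySem.Chars.splitOn.go]
    | cons c rest =>
      rw [PySem.Chars.splitOn.go]
      split
      · exact ih _ _ _
      · exact ih _ _ _

theorem pySplit_ne_nil (s sep : String) (h : sep ≠ "") : pySplit s sep ≠ [] := by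
  have hsep : sep.toList.isEmpty = false := by
    cases hx : sep.toList with
    | nil => exact absurd (by cases sep; simpa using hx) h
    | cons a l => simp
  simp only [pySplit, PySem.Str.split?, PySem.Chars.split?, hsep, Bool.false_eq_true,
    if_false, Option.map_some, Option.getD_some, ne_eq, List.map_eq_nil_iff]
  exact splitOn_go_ne_nil _ _ _ _ _

theorem lastCode_eq (l : List (List String)) :
    ((l.map (fun kv => "day/" ++ (PySem.List.pyGet? kv 1).getD "")).getLastD "day")
      = (match (l.map (fun kv => (PySem.List.pyGet? kv 1).getD "")).getLast? with
         | some v => "day/" ++ v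
         | none => "day") := by
  rw [List.getLastD_eq_getLast?, List.getLast?_map, List.getLast?_map]
  cases l.getLast? <;> rfl

theorem lastSeg_code_eq (segs : List String) (dn : String) (hseg : segs ≠ []) :
    (segs.map (fun s => some (dn ++ "/" ++ (PySem.List.pyGet? (pySplit s ",") 0).getD ""))).getLastD none
      = some (dn ++ "/" ++
          (PySem.List.pyGet? (pySplit ((PySem.List.pyGet? segs (-1)).getD "") ",") 0).getD "") := by
  rw [PySem.List.pyGet?_neg_one, List.getLastD_eq_getLast?, List.getLast?_map]
  cases h : segs.getLast? with
  | none => exact absurd (List.getLast?_eq_none_iff.mp h) hseg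
  | some s0 => rfl

theorem pyGet?_neg_one_sorted (l : List String) :
    PySem.List.pyGet? (PySem.List.sorted l (fun x => x) false) (-1) = l.max? := by
  rw [PySem.List.pyGet?_neg_one, sorted_getLast?_eq_max?]

-- ===== VERDICT (by name: the statement is the Claim_ definition above) =====
theorem code_from_icon_spec : Claim_equal_code_from_icon := by
  intro icon _ _
  unfold Spec_code_from_icon
  match icon with
  | none => rfl
  | some icon0 =>
    simp only [code_from_icon, code_from_icon_alt]
    by_cases h0 : icon0 = ""
    · simp [h0]
    by_cases hdi : PySem.Str.isIn "DualImage" icon0 = true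
    · simp only [h0, hdi, ite_false, if_pos]
      rw [dualLoop_eq, mfold_eq_max?, ← pyGet?_neg_one_sorted, lastCode_eq,
        get?_foldl_insert]
      cases ((( (pySplit ((PySem.List.pyGet? (pySplit icon0 "?") 1).getD "") "&").map
          (fun p => pySplit p "=")).filter
            (fun kv => decide ((PySem.List.pyGet? kv 0).getD "" = "i"))).map
            (fun kv => (PySem.List.pyGet? kv 1).getD "")).getLast? <;>
        simp [PySem.Dict.get?_empty]
    · simp only [h0, hdi, ite_false, Bool.false_eq_true]
      have hseg : pySplit (PySem.Str.replace (PySem.Str.replace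
          (if PySem.Str.isIn "?" icon0 = true then
            PySem.Str.join "?" (pySplit icon0 "?").dropLast else icon0) ".png" "") ".jpg" "") "/" ≠ [] :=
        pySplit_ne_nil _ "/" (by decide)
      rw [mainLoop_eq, mfold_eq_max?, ← pyGet?_neg_one_sorted]
      cases hd : PySem.Str.isIn "/day/" (PySem.Str.replace (PySem.Str.replace
          (if PySem.Str.isIn "?" icon0 = true then
            PySem.Str.join "?" (pySplit icon0 "?").dropLast else icon0) ".png" "") ".jpg" "") <;>
      cases hn : PySem.Str.isIn "/night/" (PySem.Str.replace (PySem.Str.replace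
          (if PySem.Str.isIn "?" icon0 = true then
            PySem.Str.join "?" (pySplit icon0 "?").dropLast else icon0) ".png" "") ".jpg" "") <;>
      simp only [ite_false, Bool.not_true, Bool.not_false, Bool.and_false,
        Bool.and_true, Bool.false_eq_true, if_pos] <;>
      rw [lastSeg_code_eq _ _ hseg]
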